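-- pv_equiv track=rewrite | github.com/vlad-bezden/leetcode | problems/7. Reverse Integer/reverse_integer.py | reverse_3
-- ===== SOURCE A (Python) =====
-- def reverse_3(x: int) -> int:
--     """Using integer to divide number by 10."""
--     answer = 0
--     sign = -1 if x < 0 else 1
--     x *= sign
--     while x:
--         x, r = divmod(x, 10)
--         answer = answer * 10 + r
--     answer *= sign
--     return 0 if answer >= 2 ** 31 - 1 or answer <= -(2 ** 31) else answer
-- ===== SOURCE B (Python) =====
-- def reverse_3(x: int) -> int:
--     """Reverse digits by a power-of-10 table and one zip-sum (no divmod accumulator loop)."""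
--     sign = -1 if x < 0 else 1
--     n = abs(x)
--     pows = []
--     p = 1
--     while p <= n:
--         pows.append(p)
--         p *= 10
--     answer = sign * sum(n // p % 10 * q for p, q in zip(pows, reversed(pows)))
--     return 0 if answer >= 2 ** 31 - 1 or answer <= -(2 ** 31) else answer
-- ===== Notes on version B (the rewrite author's own statement) =====
-- stated objective: alternative
-- what changed: Replaces the destructive divmod while-loop with its multiplying accumulator by building a power-of-10 table once and summing each digit n//p%10 times the mirrored power via zip(pows, reversed(pows)).
import Mathlib
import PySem

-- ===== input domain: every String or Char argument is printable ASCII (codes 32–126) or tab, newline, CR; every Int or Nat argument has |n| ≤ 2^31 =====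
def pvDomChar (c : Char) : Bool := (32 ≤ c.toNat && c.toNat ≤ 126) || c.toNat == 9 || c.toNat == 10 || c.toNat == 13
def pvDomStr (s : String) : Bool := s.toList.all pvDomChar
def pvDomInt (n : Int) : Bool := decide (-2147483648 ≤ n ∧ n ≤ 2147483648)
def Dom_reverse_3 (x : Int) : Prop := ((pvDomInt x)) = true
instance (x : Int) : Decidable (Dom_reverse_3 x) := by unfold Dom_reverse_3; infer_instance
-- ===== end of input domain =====

-- B replaces A's destructive divmod accumulator loop by a power-of-10 table and one zip-sum (alternative, same cost).

-- ===== PORT A =====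
-- the while-loop 'x, r = divmod(x, 10); answer = answer * 10 + r'; it runs after 'x *= sign',
-- so x ≥ 0 and Python's divmod(x, 10) is exactly Nat division/remainder
def pvRevLoop (n acc : Nat) : Nat :=
  if h : n = 0 then acc else pvRevLoop (n / 10) (acc * 10 + n % 10)
  termination_by n
  decreasing_by exact Nat.div_lt_self (Nat.pos_of_ne_zero h) (by omega)

def reverse_3 (x : Int) : Int :=
  let sign : Int := if x < 0 then -1 else 1
  -- 'x *= sign' makes x = |x|, a nonnegative int: we loop on x.natAbs
  let answer : Int := (pvRevLoop x.natAbs 0 : Int) * sign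
  if answer ≥ 2 ^ 31 - 1 ∨ answer ≤ -(2 ^ 31) then 0 else answer

-- ===== PORT B =====
-- 'p = 1; while p <= n: pows.append(p); p *= 10' — p stays positive, carried as the hypothesis hp
def pvPows (n p : Nat) (hp : 0 < p) : List Nat :=
  if p ≤ n then p :: pvPows n (p * 10) (by omega) else []
  termination_by n + 1 - p
  decreasing_by omega

def reverse_3_alt (x : Int) : Int :=
  let sign : Int := if x < 0 then -1 else 1
  let n : Nat := x.natAbs  -- n = abs(x)
  let pows := pvPows n 1 (by omega)
  let answer : Int :=
    sign * ((((pows.zip pows.reverse).map (fun pq => n / pq.1 % 10 * pq.2)).sum : Nat) : Int)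
  if answer ≥ 2 ^ 31 - 1 ∨ answer ≤ -(2 ^ 31) then 0 else answer

-- ===== PRECONDITION & SPEC =====
def Spec_reverse_3 (x : Int) (out : Int) : Prop := out = reverse_3_alt x
instance (x : Int) (out : Int) : Decidable (Spec_reverse_3 x out) := by unfold Spec_reverse_3; infer_instance

-- ===== CLAIM (what is proved, stated in full; the proofs are below) =====
def Claim_equal_reverse_3 : Prop := ∀ (x : Int), Dom_reverse_3 x → Spec_reverse_3 x (reverse_3 x)

-- ===== LEMMAS AND PROOFS =====

theorem pvRevLoop_acc (m : Nat) :
    ∀ acc, pvRevLoop m acc = pvRevLoop m 0 + acc * 10 ^ (Nat.digits 10 m).length := by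
  induction m using Nat.strong_induction_on with
  | _ m ih =>
    intro acc
    by_cases h : m = 0
    · subst h; simp [pvRevLoop]
    · conv_lhs => rw [pvRevLoop]
      conv_rhs => rw [pvRevLoop]
      simp only [h, dif_neg, not_false_iff]
      rw [ih (m / 10) (Nat.div_lt_self (Nat.pos_of_ne_zero h) (by omega)) (acc * 10 + m % 10),
          ih (m / 10) (Nat.div_lt_self (Nat.pos_of_ne_zero h) (by omega)) (0 * 10 + m % 10),
          Nat.digits_def' (by omega : 1 < 10) (Nat.pos_of_ne_zero h)]
      simp only [List.length_cons, pow_succ]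
      ring

theorem pvPows_eq (n p : Nat) (hp : 0 < p) :
    pvPows n p hp = (List.range (Nat.digits 10 (n / p)).length).map (fun i => p * 10 ^ i) := by
  fun_induction pvPows n p hp with
  | case1 p hp hle ih =>
    have hpos : 0 < n / p := (Nat.one_le_div_iff hp).mpr hle
    rw [ih, Nat.digits_def' (by omega : 1 < 10) hpos, List.length_cons,
        List.range_succ_eq_map, List.map_cons, List.map_map,
        Nat.div_div_eq_div_mul, Nat.mul_comm p 10]
    simp only [pow_zero, Nat.mul_one, List.cons.injEq, true_and]
    apply List.map_congr_left
    intro i _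
    simp [Function.comp, pow_succ, Nat.mul_comm, Nat.mul_assoc]
  | case2 p hp hgt =>
    rw [Nat.div_eq_of_lt (by omega)]
    simp

theorem zip_range_reverse (L : Nat) :
    (List.range L).zip (List.range L).reverse = (List.range L).map (fun i => (i, L - 1 - i)) := by
  apply List.ext_getElem
  · simp
  · intro i h1 h2
    simp only [List.getElem_zip, List.getElem_map, List.getElem_reverse, List.getElem_range,
      List.length_range]

theorem sum_digits (n : Nat) :
    ((List.range (Nat.digits 10 n).length).map
      (fun i => n / 10 ^ i % 10 * 10 ^ ((Nat.digits 10 n).length - 1 - i))).sum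
      = pvRevLoop n 0 := by
  induction n using Nat.strong_induction_on with
  | _ n ih =>
    by_cases h : n = 0
    · subst h; simp [pvRevLoop]
    · have hpos : 0 < n := Nat.pos_of_ne_zero h
      rw [Nat.digits_def' (by omega : 1 < 10) hpos, List.length_cons,
          List.range_succ_eq_map, List.map_cons, List.map_map, List.sum_cons]
      have hfun : ((fun i => n / 10 ^ i % 10 * 10 ^ ((Nat.digits 10 (n / 10)).length + 1 - 1 - i)) ∘ Nat.succ)
          = (fun i => (n / 10) / 10 ^ i % 10 * 10 ^ ((Nat.digits 10 (n / 10)).length - 1 - i)) := by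
        funext i
        simp only [Function.comp_apply, Nat.succ_eq_add_one]
        rw [pow_succ, Nat.mul_comm (10 ^ i) 10, ← Nat.div_div_eq_div_mul]
        have he : (Nat.digits 10 (n / 10)).length + 1 - 1 - (i + 1)
            = (Nat.digits 10 (n / 10)).length - 1 - i := by omega
        rw [he]
      rw [hfun, ih (n / 10) (Nat.div_lt_self hpos (by omega))]
      conv_rhs => rw [pvRevLoop]
      simp only [h, dif_neg, not_false_iff]
      rw [pvRevLoop_acc (n / 10) (0 * 10 + n % 10)]
      simp only [pow_zero, Nat.div_one, Nat.zero_mul, Nat.zero_add]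
      have hL : (Nat.digits 10 (n / 10)).length + 1 - 1 - 0 = (Nat.digits 10 (n / 10)).length := by
        omega
      rw [hL]
      exact Nat.add_comm _ _

theorem core_eq (n : Nat) :
    (((pvPows n 1 (by omega)).zip (pvPows n 1 (by omega)).reverse).map
        (fun pq => n / pq.1 % 10 * pq.2)).sum = pvRevLoop n 0 := by
  rw [pvPows_eq, Nat.div_one]
  have h1 : (fun i => (1 : Nat) * 10 ^ i) = (fun i : Nat => 10 ^ i) := by
    funext i; exact Nat.one_mul _
  rw [h1, ← List.map_reverse, List.zip_map, zip_range_reverse, List.map_map, List.map_map]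
  have h2 : (((fun pq => n / pq.1 % 10 * pq.2) ∘ (Prod.map (fun i : Nat => 10 ^ i) (fun i : Nat => 10 ^ i)))
        ∘ (fun i => (i, (Nat.digits 10 n).length - 1 - i)))
      = (fun i => n / 10 ^ i % 10 * 10 ^ ((Nat.digits 10 n).length - 1 - i)) := by
    funext i; rfl
  rw [h2, sum_digits]

-- ===== VERDICT (by name: the statement is the Claim_ definition above) =====
theorem reverse_3_spec : Claim_equal_reverse_3 := by
  intro x _
  unfold Spec_reverse_3 reverse_3 reverse_3_alt
  dsimp only
  rw [core_eq, Int.mul_comm]
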